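-- pv_equiv track=rewrite | github.com/zijiancogito/decompiler-eval | src-v1/process/raw/decompile/preprocess/check_concat/check_concat.py | match_angr_concat
-- ===== SOURCE A (Python) =====
-- def match_angr_concat(s):
--     stack = []
--     match_idx = -1
--     flag = 0
--     for i, ch in enumerate(s):
--         if ch == '(':
--             stack.append(ch)
--         elif ch == ')':
--             try:
--                 stack.pop()
--             except:
--                 match_idx = i
--                 break
--         else:
--             pass
--     concat_str = ""
--     if match_idx != -1:
--         concat_str = s[:match_idx+1]
--     return concat_str
-- ===== SOURCE B (Python) =====
-- def match_angr_concat(s):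
--     # Characterisation: the k-th ')' (0-based) is the first unmatched closer
--     # exactly when the number of '(' strictly before it is <= k (not enough
--     # openers to serve the k earlier closers and this one).  Stage 1 collects
--     # (index, opens-before) for every ')'; stage 2 finds the first such k.
--     closers = []
--     opens = 0
--     for i, ch in enumerate(s):
--         if ch == ')':
--             closers.append((i, opens))
--         elif ch == '(':
--             opens += 1
--     for k, (i, o) in enumerate(closers):
--         if o <= k:
--             return s[:i + 1]
--     return ""
-- ===== Notes on version B (the rewrite author's own statement) =====
-- stated objective: alternative
-- what changed: Replaces A's stack-with-early-break scan by a two-stage count-based characterisation: collect (index, number-of-'('-before) for every ')' in one pass, then find the first k-th closer whose open-count is <= k; no stack or running balance is ever maintained.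
import Mathlib
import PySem

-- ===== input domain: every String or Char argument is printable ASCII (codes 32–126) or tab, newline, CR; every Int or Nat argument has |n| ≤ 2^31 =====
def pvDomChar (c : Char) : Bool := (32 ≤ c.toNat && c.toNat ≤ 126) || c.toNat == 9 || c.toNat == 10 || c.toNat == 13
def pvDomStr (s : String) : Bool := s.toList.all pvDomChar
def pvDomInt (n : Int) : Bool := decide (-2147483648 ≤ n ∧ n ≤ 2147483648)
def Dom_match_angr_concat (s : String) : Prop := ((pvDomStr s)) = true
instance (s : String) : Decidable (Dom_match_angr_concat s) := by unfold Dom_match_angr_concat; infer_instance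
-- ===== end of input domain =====

-- B replaces A's stack-with-early-break scan by a two-stage count characterisation
-- (collect (index, opens-before) for each ')', then find the first k-th closer with
-- opens-before ≤ k).  Same O(n) cost; alternative decomposition.

-- ===== PORT A =====
-- A's loop: push on '(', pop on ')' (empty pop = record index i and break), ignore others.
-- Returns the index of the first unmatched ')' (none if the loop finishes).
def pvALoop : List Char → List Char → Nat → Option Nat
  | [], _, _ => none
  | c :: rest, stack, i =>
    if c = '(' then pvALoop rest (c :: stack) (i + 1)
    else if c = ')' then
      match stack with
      | [] => some i                 -- stack.pop() raises: match_idx = i; break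
      | _ :: st => pvALoop rest st (i + 1)
    else pvALoop rest stack (i + 1)

def match_angr_concat (s : String) : String :=
  match pvALoop s.toList [] 0 with
  | some i => String.ofList (s.toList.take (i + 1))   -- s[:match_idx+1], match_idx ≥ 0 so take is exact
  | none => ""

-- ===== PORT B =====
-- Stage 1: (index, number of '(' strictly before) for every ')' in s.
def pvClosers : List Char → Nat → Nat → List (Nat × Nat)
  | [], _, _ => []
  | c :: rest, i, opens =>
    if c = ')' then (i, opens) :: pvClosers rest (i + 1) opens
    else if c = '(' then pvClosers rest (i + 1) (opens + 1)
    else pvClosers rest (i + 1) opens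

-- Stage 2: first k (enumeration counter) with opens-before ≤ k; yields that closer's index.
def pvFindCloser : List (Nat × Nat) → Nat → Option Nat
  | [], _ => none
  | (i, o) :: rest, k => if o ≤ k then some i else pvFindCloser rest (k + 1)

def match_angr_concat_alt (s : String) : String :=
  match pvFindCloser (pvClosers s.toList 0 0) 0 with
  | some i => String.ofList (s.toList.take (i + 1))   -- s[:i+1]
  | none => ""

-- ===== PRECONDITION & SPEC =====
def Spec_match_angr_concat (s : String) (out : String) : Prop := out = match_angr_concat_alt s
instance (s : String) (out : String) : Decidable (Spec_match_angr_concat s out) := by unfold Spec_match_angr_concat; infer_instance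

-- ===== CLAIM (what is proved, stated in full; the proofs are below) =====
def Claim_equal_match_angr_concat : Prop := ∀ (s : String), Dom_match_angr_concat s → Spec_match_angr_concat s (match_angr_concat s)

-- ===== LEMMAS AND PROOFS =====

-- Invariant linking the two: with C closers consumed so far, A's stack holds
-- exactly (opens so far) - C = stack.length entries, so running A's loop equals
-- searching B's closer table built with opens = stack.length + C from counter C.
theorem pvALoop_eq_closers (cs : List Char) :
    ∀ (stack : List Char) (i C : Nat),
      pvALoop cs stack i = pvFindCloser (pvClosers cs i (stack.length + C)) C := by
  induction cs with
  | nil => intro stack i C; simp [pvALoop, pvClosers, pvFindCloser]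
  | cons c rest ih =>
    intro stack i C
    by_cases h1 : c = '('
    · subst h1
      simp only [pvALoop, pvClosers, reduceIte,
        if_neg (show ('(' : Char) ≠ ')' by decide)]
      rw [ih ('(' :: stack) (i + 1) C]
      have : ('(' :: stack).length + C = stack.length + C + 1 := by
        simp [List.length_cons]; omega
      rw [this]
    · by_cases h2 : c = ')'
      · subst h2
        cases stack with
        | nil =>
          simp [pvALoop, pvClosers, pvFindCloser, h1]
        | cons d st =>
          simp only [pvALoop, pvClosers, pvFindCloser, h1, reduceIte]
          have hgt : ¬ ((d :: st).length + C ≤ C) := by simp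
          rw [if_neg hgt]
          have : (d :: st).length + C = st.length + (C + 1) := by simp; omega
          rw [this, ih st (i + 1) (C + 1)]
      · simp only [pvALoop, pvClosers, if_neg h1, if_neg h2]
        exact ih stack (i + 1) C

-- ===== VERDICT (by name: the statement is the Claim_ definition above) =====
theorem match_angr_concat_spec : Claim_equal_match_angr_concat := by
  intro s _
  unfold Spec_match_angr_concat match_angr_concat match_angr_concat_alt
  rw [pvALoop_eq_closers s.toList [] 0 0]
  rfl
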